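-- pv_equiv track=rewrite | github.com/wmoore012/youtube-music-analytics | src/youtubeviz/charts.py | _default_palette
-- ===== SOURCE A (Python) =====
-- def _default_palette(n: int) -> list[str]:
--     # Plotly category10-like fallback palette
--     base = [
--         "#1f77b4",
--         "#ff7f0e",
--         "#2ca02c",
--         "#d62728",
--         "#9467bd",
--         "#8c564b",
--         "#e377c2",
--         "#7f7f7f",
--         "#bcbd22",
--         "#17becf",
--     ]
--     if n <= len(base):
--         return base[:n]
--     # repeat if needed
--     out = []
--     while len(out) < n:
--         out.extend(base)
--     return out[:n]
-- ===== SOURCE B (Python) =====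
-- def _default_palette(n: int) -> list[str]:
--     # Plotly category10-like fallback palette
--     base = [
--         "#1f77b4",
--         "#ff7f0e",
--         "#2ca02c",
--         "#d62728",
--         "#9467bd",
--         "#8c564b",
--         "#e377c2",
--         "#7f7f7f",
--         "#bcbd22",
--         "#17becf",
--     ]
--     if n <= len(base):
--         return base[:n]
--     # index-map: each position picks its color directly by modular indexing,
--     # no tiled copies of the base list are ever built
--     return [base[i % len(base)] for i in range(n)]
-- ===== Notes on version B (the rewrite author's own statement) =====
-- stated objective: alternative
-- what changed: A grows an output list by repeatedly extending it with whole copies of base and truncating; B never builds tiled copies: it maps each index i in range(n) directly to base[i % len(base)] by modular indexing.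
import Mathlib
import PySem

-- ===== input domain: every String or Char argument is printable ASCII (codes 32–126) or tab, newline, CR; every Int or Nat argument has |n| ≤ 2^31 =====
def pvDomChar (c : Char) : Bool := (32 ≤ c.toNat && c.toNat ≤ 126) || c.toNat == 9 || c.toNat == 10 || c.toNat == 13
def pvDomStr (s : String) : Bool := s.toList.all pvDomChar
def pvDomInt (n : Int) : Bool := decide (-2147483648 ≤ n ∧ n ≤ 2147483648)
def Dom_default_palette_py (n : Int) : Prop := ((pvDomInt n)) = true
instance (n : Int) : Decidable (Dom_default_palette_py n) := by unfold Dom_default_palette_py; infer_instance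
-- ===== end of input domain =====

-- B replaces A's while/extend tiling loop by a per-index comprehension that picks
-- base[i % len(base)] directly (alternative decomposition, same asymptotic cost).

-- ===== PORT A =====
def pvBase : List String :=
  ["#1f77b4", "#ff7f0e", "#2ca02c", "#d62728", "#9467bd",
   "#8c564b", "#e377c2", "#7f7f7f", "#bcbd22", "#17becf"]

-- the 'while len(out) < n: out.extend(base)' loop
def pvLoopA (n : Int) (out : List String) : List String :=
  if _h : (out.length : Int) < n then pvLoopA n (out ++ pvBase) else out
termination_by (n - out.length).toNat
decreasing_by
  simp only [List.length_append]
  have : pvBase.length = 10 := by decide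
  omega

def default_palette_py (n : Int) : List String :=
  if n ≤ (pvBase.length : Int) then
    PySem.List.slice pvBase none (some n)
  else
    PySem.List.slice (pvLoopA n []) none (some n)

-- ===== PORT B =====
def default_palette_py_alt (n : Int) : List String :=
  if n ≤ (pvBase.length : Int) then
    PySem.List.slice pvBase none (some n)
  else
    -- [base[i % len(base)] for i in range(n)]; the index is always in range,
    -- so pyGetD with a dummy default is exact here
    (PySem.List.pyRange 0 n 1).map
      (fun i => PySem.List.pyGetD pvBase (PySem.Int.mod i (pvBase.length : Int)) "")

-- ===== PRECONDITION & SPEC =====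
def Spec_default_palette_py (n : Int) (out : List String) : Prop := out = default_palette_py_alt n
instance (n : Int) (out : List String) : Decidable (Spec_default_palette_py n out) := by unfold Spec_default_palette_py; infer_instance

-- ===== CLAIM =====
def Claim_equal_default_palette_py : Prop := ∀ (n : Int), Dom_default_palette_py n → Spec_default_palette_py n (default_palette_py n)

-- ===== LEMMAS AND PROOFS =====

def pvRep (m : Nat) : List String := (List.replicate m pvBase).flatten

lemma pvRep_length (m : Nat) : (pvRep m).length = 10 * m := by
  induction m with
  | zero => rfl
  | succ k ih =>
      simp [pvRep, List.replicate_succ, List.flatten_cons] at *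
      have hb : pvBase.length = 10 := by decide
      omega

lemma pvRep_succ (m : Nat) : pvRep m ++ pvBase = pvRep (m + 1) := by
  simp [pvRep, List.replicate_succ']

lemma pvRep_succ' (m : Nat) : pvRep (m + 1) = pvBase ++ pvRep m := by
  simp [pvRep, List.replicate_succ]

-- each position of the tiled list holds base[i % 10]
lemma pvRep_getElem (m i : Nat) (h : i < (pvRep m).length) :
    (pvRep m)[i] = pvBase[i % 10]'(by have h10 : pvBase.length = 10 := (by decide); omega) := by
  induction m generalizing i with
  | zero => simp [pvRep_length] at h
  | succ k ih =>
      simp only [pvRep_succ'] at h ⊢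
      by_cases hi : i < pvBase.length
      · rw [List.getElem_append_left hi]
        have h10 : pvBase.length = 10 := by decide
        congr 1
        omega
      · rw [List.getElem_append_right (Nat.le_of_not_lt hi)]
        rw [ih]
        have h10 : pvBase.length = 10 := by decide
        congr 1
        omega

-- the while-loop reaches exactly ceil(n/10) copies of base
lemma pvLoopA_spec (n : Int) (hn : 10 < n) :
    ∀ j : Nat, (10 * j : Int) < n → pvLoopA n (pvRep j) = pvRep ((n - 1).toNat / 10 + 1) := by
  intro j hj
  rw [pvLoopA]
  rw [dif_pos (by rw [pvRep_length]; exact_mod_cast hj)]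
  by_cases h2 : (10 * (j + 1) : Int) < n
  · rw [pvRep_succ]
    exact pvLoopA_spec n hn (j + 1) h2
  · rw [pvRep_succ, pvLoopA, dif_neg (by rw [pvRep_length]; push_cast; omega)]
    congr 1
    omega
termination_by j => (n - 10 * j).toNat
decreasing_by omega

lemma pvRep_zero : pvRep 0 = [] := rfl

-- ===== VERDICT =====
theorem default_palette_py_spec : Claim_equal_default_palette_py := by
  intro n _
  unfold Spec_default_palette_py default_palette_py default_palette_py_alt
  by_cases h : n ≤ (pvBase.length : Int)
  · rw [if_pos h, if_pos h]
  · rw [if_neg h, if_neg h]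
    have hn : 10 < n := by simpa using not_le.mp h
    have hloop : pvLoopA n [] = pvRep ((n - 1).toNat / 10 + 1) := by
      rw [← pvRep_zero]
      exact pvLoopA_spec n hn 0 (by omega)
    rw [hloop]
    set m : Nat := (n - 1).toNat / 10 + 1 with hm
    have hmn : n.toNat ≤ 10 * m := by
      have := Nat.lt_succ_of_le (Nat.div_mul_le_self (n - 1).toNat 10)
      omega
    rw [PySem.List.slice_to _ (by omega)]
    apply List.ext_getElem
    · simp [pvRep_length, PySem.List.length_pyRange_one]
      omega
    · intro i h1 h2
      have hi : i < n.toNat := by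
        have := h1; simp [pvRep_length] at this; omega
      rw [List.getElem_take, pvRep_getElem]
      rw [List.getElem_map, PySem.List.getElem_pyRange_one]
      have hz : (0 : Int) + (i : Int) = (i : Int) := by omega
      rw [hz]
      have hmod : PySem.Int.mod (i : Int) ((pvBase.length : Nat) : Int) = ((i % 10 : Nat) : Int) := by
        have h10 : ((pvBase.length : Nat) : Int) = ((10 : Nat) : Int) := by decide
        rw [h10]; exact PySem.Int.mod_natCast i 10
      rw [hmod, PySem.List.pyGetD_natCast]
      have hlt : i % 10 < pvBase.length := by
        have := Nat.mod_lt i (show 0 < 10 by decide)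
        simp only [show pvBase.length = 10 from by decide]
        omega
      rw [List.getD_eq_getElem _ _ hlt]
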